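-- pv_equiv track=rewrite | github.com/arnavkots1/StratMancer | backend/services/draft_analyzer.py | _identify_comp_type
-- ===== SOURCE A (Python) =====
-- from typing import Dict, List, Any, Optional
--
-- def _identify_comp_type(picks: Dict[str, Dict]) -> str:
--     """Identify the primary composition archetype"""
--     # Simple heuristic based on champion classes and roles
--     engage_count = sum(1 for p in picks.values()
--                       if any(tag in ['engage', 'initiator']
--                             for tag in p.get('tags', {}).get('role', [])))
--     poke_count = sum(1 for p in picks.values()
--                     if 'poke' in p.get('tags', {}).get('role', []))
--     splitpush_count = sum(1 for p in picks.values()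
--                          if 'splitpush' in p.get('tags', {}).get('role', []))
--
--     if engage_count >= 2:
--         return "Teamfight/Engage"
--     elif poke_count >= 2:
--         return "Poke/Siege"
--     elif splitpush_count >= 1:
--         return "Split Push"
--     else:
--         return "Balanced/Skirmish"
-- ===== SOURCE B (Python) =====
-- def _identify_comp_type(picks):
--     """Identify the primary composition archetype (single pass, early exit on engage)."""
--     engage = poke = split = 0
--     for p in picks.values():
--         roles = p.get('tags', {}).get('role', [])
--         if 'engage' in roles or 'initiator' in roles:
--             engage += 1
--             if engage >= 2:
--                 return "Teamfight/Engage"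
--         if 'poke' in roles:
--             poke += 1
--         if 'splitpush' in roles:
--             split += 1
--     if poke >= 2:
--         return "Poke/Siege"
--     if split >= 1:
--         return "Split Push"
--     return "Balanced/Skirmish"
-- ===== Notes on version B (the rewrite author's own statement) =====
-- stated objective: alternative
-- what changed: Replaces A's three separate generator-sum passes over picks.values() with a single loop maintaining three counters that returns early as soon as the engage count reaches 2 (the top-priority branch can no longer change), with the remaining threshold checks after the loop.
import Mathlib
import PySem

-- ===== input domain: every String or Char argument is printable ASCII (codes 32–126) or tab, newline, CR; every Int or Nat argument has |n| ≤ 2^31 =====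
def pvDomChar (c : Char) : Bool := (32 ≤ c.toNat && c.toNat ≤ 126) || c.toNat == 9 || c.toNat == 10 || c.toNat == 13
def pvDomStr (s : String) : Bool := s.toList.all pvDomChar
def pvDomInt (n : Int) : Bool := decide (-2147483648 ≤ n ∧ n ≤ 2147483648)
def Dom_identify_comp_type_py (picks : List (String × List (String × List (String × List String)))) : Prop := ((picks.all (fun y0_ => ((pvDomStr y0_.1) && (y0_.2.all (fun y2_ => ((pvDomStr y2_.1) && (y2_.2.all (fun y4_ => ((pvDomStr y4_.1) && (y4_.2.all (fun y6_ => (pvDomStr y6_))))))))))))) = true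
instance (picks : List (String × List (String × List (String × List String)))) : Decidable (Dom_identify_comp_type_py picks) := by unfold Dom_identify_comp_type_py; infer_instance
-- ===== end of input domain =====

-- B replaces A's three separate counting passes by one pass with three counters and an
-- early return once the engage count reaches 2; return value proved identical on all inputs.

-- shared helper: Python dict.get(k, dflt) on an association list (first match)
def pvGetD {α : Type} (d : List (String × α)) (k : String) (dflt : α) : α :=
  match d.find? (fun kv => kv.1 == k) with
  | some kv => kv.2
  | none => dflt

-- p.get('tags', {}).get('role', [])
def pvRolesOf (p : List (String × List (String × List String))) : List String :=
  pvGetD (pvGetD p "tags" []) "role" []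

-- ===== PORT A =====
def identify_comp_type_py (picks : List (String × List (String × List (String × List String)))) : String :=
  let engage_count : Int :=
    picks.foldl (fun acc kv =>
      if (pvRolesOf kv.2).any (fun tag => (["engage", "initiator"] : List String).contains tag)
      then acc + 1 else acc) 0
  let poke_count : Int :=
    picks.foldl (fun acc kv =>
      if (pvRolesOf kv.2).contains "poke" then acc + 1 else acc) 0
  let splitpush_count : Int :=
    picks.foldl (fun acc kv =>
      if (pvRolesOf kv.2).contains "splitpush" then acc + 1 else acc) 0
  if engage_count ≥ 2 then "Teamfight/Engage"
  else if poke_count ≥ 2 then "Poke/Siege"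
  else if splitpush_count ≥ 1 then "Split Push"
  else "Balanced/Skirmish"

-- ===== PORT B =====
def identify_comp_type_py_altGo :
    List (String × List (String × List (String × List String))) → Int → Int → Int → String
  | [], _, poke, split =>
      if poke ≥ 2 then "Poke/Siege"
      else if split ≥ 1 then "Split Push"
      else "Balanced/Skirmish"
  | kv :: rest, engage, poke, split =>
      let roles := pvRolesOf kv.2
      if roles.contains "engage" || roles.contains "initiator" then
        if engage + 1 ≥ 2 then "Teamfight/Engage"
        else identify_comp_type_py_altGo rest (engage + 1)
              (if roles.contains "poke" then poke + 1 else poke)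
              (if roles.contains "splitpush" then split + 1 else split)
      else identify_comp_type_py_altGo rest engage
              (if roles.contains "poke" then poke + 1 else poke)
              (if roles.contains "splitpush" then split + 1 else split)

def identify_comp_type_py_alt (picks : List (String × List (String × List (String × List String)))) : String :=
  identify_comp_type_py_altGo picks 0 0 0

-- ===== PRECONDITION & SPEC =====
def Spec_identify_comp_type_py (picks : List (String × List (String × List (String × List String)))) (out : String) : Prop := out = identify_comp_type_py_alt picks
instance (picks : List (String × List (String × List (String × List String)))) (out : String) : Decidable (Spec_identify_comp_type_py picks out) := by unfold Spec_identify_comp_type_py; infer_instance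

-- ===== CLAIM (what is proved, stated in full; the proofs are below) =====
def Claim_equal_identify_comp_type_py : Prop := ∀ (picks : List (String × List (String × List (String × List String)))), Dom_identify_comp_type_py picks → Spec_identify_comp_type_py picks (identify_comp_type_py picks)

-- ===== LEMMAS AND PROOFS =====

-- boolean predicates on a pick, as B tests them
def pvEngB (kv : String × List (String × List (String × List String))) : Bool :=
  (pvRolesOf kv.2).contains "engage" || (pvRolesOf kv.2).contains "initiator"
def pvPokeB (kv : String × List (String × List (String × List String))) : Bool :=
  (pvRolesOf kv.2).contains "poke"
def pvSplitB (kv : String × List (String × List (String × List String))) : Bool :=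
  (pvRolesOf kv.2).contains "splitpush"

-- the final cascade as a function of the three totals
def pvClassify (e p s : Int) : String :=
  if e ≥ 2 then "Teamfight/Engage"
  else if p ≥ 2 then "Poke/Siege"
  else if s ≥ 1 then "Split Push"
  else "Balanced/Skirmish"

-- A's membership test equals B's two contains tests
lemma pvEng_eq (rs : List String) :
    (rs.any (fun tag => (["engage", "initiator"] : List String).contains tag))
      = (rs.contains "engage" || rs.contains "initiator") := by
  induction rs with
  | nil => rfl
  | cons h t ih =>
      rw [List.any_cons, ih]
      by_cases h1 : h = "engage" <;> by_cases h2 : h = "initiator" <;>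
        simp [h1, h2, eq_comm]

-- A's accumulator loop is a count
lemma pv_foldl_count (pred : (String × List (String × List (String × List String))) → Bool) :
    ∀ (xs : List (String × List (String × List (String × List String)))) (a : Int),
      xs.foldl (fun acc kv => if pred kv then acc + 1 else acc) a
        = a + ((xs.countP pred : Nat) : Int) := by
  intro xs
  induction xs with
  | nil => intro a; simp
  | cons h t ih =>
      intro a
      by_cases hp : pred h = true <;> simp [hp, ih]; (try push_cast); ring

lemma pvClassify_eq3 {a b c a' b' c' : Int} (h1 : a = a') (h2 : b = b') (h3 : c = c') :
    pvClassify a b c = pvClassify a' b' c' := by rw [h1, h2, h3]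

-- B's loop computes the cascade on the running totals
lemma pv_altGo_spec :
    ∀ (xs : List (String × List (String × List (String × List String)))) (e p s : Int),
      e < 2 →
      identify_comp_type_py_altGo xs e p s
        = pvClassify (e + ((xs.countP pvEngB : Nat) : Int))
                     (p + ((xs.countP pvPokeB : Nat) : Int))
                     (s + ((xs.countP pvSplitB : Nat) : Int)) := by
  intro xs
  induction xs with
  | nil =>
      intro e p s he
      simp only [identify_comp_type_py_altGo, List.countP_nil, Nat.cast_zero, add_zero,
        pvClassify]
      rw [if_neg (show ¬ e ≥ 2 by omega)]
  | cons kv rest ih =>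
      intro e p s he
      simp only [identify_comp_type_py_altGo]
      by_cases hEng : pvEngB kv = true
      · rw [if_pos (by simpa [pvEngB] using hEng)]
        by_cases h2 : e + 1 ≥ 2
        · rw [if_pos h2]
          simp only [List.countP_cons, hEng, if_pos, pvClassify]
          rw [if_pos (by omega)]
        · rw [if_neg h2]
          rw [ih (e + 1) _ _ (by omega)]
          simp only [List.countP_cons, hEng, if_pos]
          refine pvClassify_eq3 (by omega) ?_ ?_ <;>
            · simp only [pvPokeB, pvSplitB]
              split_ifs <;> simp_all <;> omega
      · rw [if_neg (by simpa [pvEngB] using hEng)]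
        rw [ih e _ _ he]
        simp only [List.countP_cons, hEng]
        refine pvClassify_eq3 (by simp) ?_ ?_ <;>
          · simp only [pvPokeB, pvSplitB]
            split_ifs <;> simp_all <;> omega

lemma pv_A_eq_classify (picks : List (String × List (String × List (String × List String)))) :
    identify_comp_type_py picks
      = pvClassify ((picks.countP pvEngB : Nat) : Int)
                   ((picks.countP pvPokeB : Nat) : Int)
                   ((picks.countP pvSplitB : Nat) : Int) := by
  unfold identify_comp_type_py pvClassify
  have hE : (fun kv : String × List (String × List (String × List String)) =>
      (pvRolesOf kv.2).any (fun tag => (["engage", "initiator"] : List String).contains tag)) = pvEngB := by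
    funext kv; exact pvEng_eq (pvRolesOf kv.2)
  simp only [hE, pv_foldl_count, zero_add]
  rfl

-- ===== VERDICT (by name: the statement is the Claim_ definition above) =====
theorem identify_comp_type_py_spec : Claim_equal_identify_comp_type_py := by
  intro picks _
  unfold Spec_identify_comp_type_py identify_comp_type_py_alt
  rw [pv_A_eq_classify, pv_altGo_spec picks 0 0 0 (by norm_num)]
  norm_num
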